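-- pv_equiv track=rewrite | github.com/michpara/ITI1120-Introduction-to-Computing-I | Labs/Lab9/prog-ex-03.py | first_one
-- ===== SOURCE A (Python) =====
-- def first_one(L):
--     '''(list)->(integer)
--     preconditions: L is a list of 0's and 1's where all 0's come before 1's
--     returns the position of the first 1 in L'''
--     start = 0
--     end = len(L)-1
--
--     while end >= start:
--         mid = (start+end)//2
--
--         if len(L) == 2:
--             if L[0] == 1:
--                 return 0
--             elif L[1] == 1:
--                 return 1
--             return -1
--
--         elif(L[mid] == 0):
--             start = mid + 1
--
--         else:
--             if L.index(L[mid]) == 0: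
--                 return 0
--             elif(L[mid-1] == 1):
--                 end = mid -1
--             else:
--                 return mid
--     return -1
-- ===== SOURCE B (Python) =====
-- def first_one(L):
--     n = len(L)
--     if n == 2:
--         return 0 if L[0] == 1 else (1 if L[1] == 1 else -1)
--
--     def go(start, end):
--         if end < start:
--             return -1
--         mid = (start + end) // 2
--         if L[mid] == 0:
--             return go(mid + 1, end)
--         if L[mid] == L[0]:  # same test as A's 'L.index(L[mid]) == 0', without the linear scan
--             return 0
--         if L[mid - 1] == 1:
--             return go(start, mid - 1)
--         return mid
--
--     return go(0, n - 1)
-- ===== Notes on version B (the rewrite author's own statement) =====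
-- stated objective: alternative
-- what changed: B drops the linear L.index scan from A's loop body (that scan only tests whether the probed element equals the list's head), hoists the loop-invariant length-2 special case out of the loop, and replaces the while loop with a recursive helper.
import Mathlib
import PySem

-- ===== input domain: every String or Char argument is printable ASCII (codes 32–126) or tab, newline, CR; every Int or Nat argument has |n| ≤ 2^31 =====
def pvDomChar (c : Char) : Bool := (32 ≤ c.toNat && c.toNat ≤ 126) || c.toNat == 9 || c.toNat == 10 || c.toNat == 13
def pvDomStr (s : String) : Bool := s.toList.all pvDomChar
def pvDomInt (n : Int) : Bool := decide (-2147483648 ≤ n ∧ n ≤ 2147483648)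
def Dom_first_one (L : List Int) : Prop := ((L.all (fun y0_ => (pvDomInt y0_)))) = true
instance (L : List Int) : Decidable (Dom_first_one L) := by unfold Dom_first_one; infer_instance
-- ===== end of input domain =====

-- B drops the linear L.index scan from the loop body (that scan only tests whether the probed
-- element equals the list's head), hoists the loop-invariant length-2 special case out of the
-- loop, and recurses instead of iterating.

-- ===== PORT A =====
-- A's while loop; start/stop are Python's start/end.  The fuel argument only makes the loop total
-- (each iteration shrinks stop+1-start, which starts at len(L) ≤ fuel, so fuel never runs out);
-- from the top-level call 0 ≤ start ≤ mid ≤ stop ≤ len-1 always holds, so every index below is in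
-- Python's range and L.index(L[mid]) always finds its argument: A raises no exception and the
-- Option comparisons below never hide an IndexError or ValueError.
def first_one_go (L : List Int) : Nat → Int → Int → Int
  | 0, _, _ => -1
  | fuel + 1, start, stop =>
    if stop ≥ start then
      let mid := PySem.Int.floordiv (start + stop) 2
      if L.length = 2 then
        if PySem.List.pyGet? L 0 = some 1 then 0
        else if PySem.List.pyGet? L 1 = some 1 then 1
        else -1
      else if PySem.List.pyGet? L mid = some 0 then
        first_one_go L fuel (mid + 1) stop
      else
        -- Python: L.index(L[mid]) == 0
        if (PySem.List.pyGet? L mid).bind (fun v => PySem.List.index? L v) = some 0 then 0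
        else if PySem.List.pyGet? L (mid - 1) = some 1 then
          first_one_go L fuel start (mid - 1)
        else mid
    else -1

def first_one (L : List Int) : Int := first_one_go L (L.length + 1) 0 ((L.length : Int) - 1)

-- ===== PORT B =====
-- B's inner recursive go; the fuel only makes it total (stop+1-start starts at len(L) ≤ fuel
-- and shrinks on every recursive call).
def first_one_alt_go (L : List Int) : Nat → Int → Int → Int
  | 0, _, _ => -1
  | fuel + 1, start, stop =>
    if stop < start then -1
    else
      let mid := PySem.Int.floordiv (start + stop) 2
      if PySem.List.pyGet? L mid = some 0 then
        first_one_alt_go L fuel (mid + 1) stop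
      else if PySem.List.pyGet? L mid = PySem.List.pyGet? L 0 then 0
      else if PySem.List.pyGet? L (mid - 1) = some 1 then
        first_one_alt_go L fuel start (mid - 1)
      else mid

def first_one_alt (L : List Int) : Int :=
  if L.length = 2 then
    if PySem.List.pyGet? L 0 = some 1 then 0
    else if PySem.List.pyGet? L 1 = some 1 then 1
    else -1
  else first_one_alt_go L (L.length + 1) 0 ((L.length : Int) - 1)

-- ===== PRECONDITION & SPEC =====
def Spec_first_one (L : List Int) (out : Int) : Prop := out = first_one_alt L
instance (L : List Int) (out : Int) : Decidable (Spec_first_one L out) := by unfold Spec_first_one; infer_instance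

-- ===== CLAIM (what is proved, stated in full; the proofs are below) =====
def Claim_equal_first_one : Prop := ∀ (L : List Int), Dom_first_one L → Spec_first_one L (first_one L)

-- ===== LEMMAS AND PROOFS =====

-- `L.index(v) == 0` says exactly that L starts with v
theorem index_head_iff (L : List Int) (v : Int) :
    PySem.List.index? L v = some 0 ↔ PySem.List.pyGet? L 0 = some v := by
  cases L with
  | nil => simp [PySem.List.index?_eq_idxOf?, PySem.List.pyGet?_zero]
  | cons x xs =>
    by_cases hx : x = v
    · subst hx
      rw [PySem.List.index?_cons_self, PySem.List.pyGet?_zero_cons]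
      simp
    · rw [PySem.List.index?_cons_of_ne _ hx, PySem.List.pyGet?_zero_cons]
      rcases h : PySem.List.index? xs v with _ | k
      · simp [hx]
      · simp [hx]

-- A's loop and B's go agree from every in-range state when the length-2 branch is dead
theorem go_eq (L : List Int) (hlen : L.length ≠ 2) :
    ∀ (fuel : Nat) (start stop : Int), 0 ≤ start → stop ≤ (L.length : Int) - 1 →
      first_one_go L fuel start stop = first_one_alt_go L fuel start stop := by
  intro fuel
  induction fuel with
  | zero => intro start stop h0 h1; rw [first_one_go, first_one_alt_go]
  | succ k ih =>
    intro start stop h0 h1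
    rw [first_one_go, first_one_alt_go]
    rcases lt_or_ge stop start with hlt | hge
    · rw [if_neg (by omega), if_pos hlt]
    · have hmid := PySem.Int.floordiv_two_mid_bounds hge
      set mid := PySem.Int.floordiv (start + stop) 2 with hmiddef
      rw [if_pos (by omega : stop ≥ start), if_neg (by omega : ¬ stop < start)]
      rw [if_neg hlen]
      obtain ⟨v, hv⟩ : ∃ v, PySem.List.pyGet? L mid = some v :=
        ⟨_, PySem.List.pyGet?_eq_some_getElem L (by omega) (by omega)⟩
      by_cases h0' : PySem.List.pyGet? L mid = some 0
      · rw [if_pos h0', if_pos h0']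
        exact ih (mid + 1) stop (by omega) h1
      · rw [if_neg h0', if_neg h0']
        have hbind : (PySem.List.pyGet? L mid).bind (fun w => PySem.List.index? L w)
            = PySem.List.index? L v := by rw [hv]; rfl
        by_cases hhead : PySem.List.pyGet? L 0 = some v
        · rw [if_pos (show ((PySem.List.pyGet? L mid).bind fun w => PySem.List.index? L w) = some 0 from by
            rw [hbind]; exact (index_head_iff L v).mpr hhead)]
          rw [if_pos (show PySem.List.pyGet? L mid = PySem.List.pyGet? L 0 from by rw [hv, hhead])]
        · rw [if_neg (show ¬ ((PySem.List.pyGet? L mid).bind fun w => PySem.List.index? L w) = some 0 from by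
            rw [hbind]; exact fun hc => hhead ((index_head_iff L v).mp hc))]
          rw [if_neg (show ¬ PySem.List.pyGet? L mid = PySem.List.pyGet? L 0 from by
            rw [hv]; exact fun hc => hhead hc.symm)]
          by_cases hm1 : PySem.List.pyGet? L (mid - 1) = some 1
          · rw [if_pos hm1, if_pos hm1]
            exact ih start (mid - 1) h0 (by omega)
          · rw [if_neg hm1, if_neg hm1]

-- ===== VERDICT (by name: the statement is the Claim_ definition above) =====
theorem first_one_spec : Claim_equal_first_one := by
  intro L _
  unfold Spec_first_one first_one first_one_alt
  by_cases hlen : L.length = 2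
  · rw [if_pos hlen, hlen]
    rw [first_one_go]
    rw [if_pos (by norm_num : ((2:Nat) : Int) - 1 ≥ 0), if_pos hlen]
  · rw [if_neg hlen]
    exact go_eq L hlen (L.length + 1) 0 ((L.length : Int) - 1) le_rfl le_rfl
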